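-- pv_equiv track=rewrite | github.com/yekaiwu/Lego_Assembly | src/plan_generation/post_processing/strategies/dependency_analysis.py | _calculate_isolation_period
-- ===== SOURCE A (Python) =====
-- from typing import Dict, Any, List, Set, Tuple
--
-- def _calculate_isolation_period(
--
--     component_steps: List[int],
--     step_dependencies: Dict[int, Set[int]],
--     extracted_steps: List[Dict[str, Any]]
-- ) -> int:
--     """
--     Calculate how long this component remained independent.
--
--     Args:
--         component_steps: Steps in this component
--         step_dependencies: All step dependencies
--         extracted_steps: All steps
--
--     Returns:
--         Number of steps the component was isolated
--     """
--     component_set = set(component_steps)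
--     sorted_steps = sorted(component_steps)
--
--     if not sorted_steps:
--         return 0
--
--     # Find when component first interacts with steps outside itself
--     first_step = sorted_steps[0]
--     last_independent_step = sorted_steps[-1]
--
--     for step in sorted_steps:
--         # Check if this step depends on steps outside component
--         deps = step_dependencies.get(step, set())
--         external_deps = deps - component_set
--
--         if external_deps:
--             # Found where component merges with external assembly
--             step_idx = sorted_steps.index(step)
--             last_independent_step = sorted_steps[step_idx - 1] if step_idx > 0 else first_step
--             break
--
--     # Calculate isolation period
--     isolation_period = last_independent_step - first_step + 1
--
--     return isolation_period
-- ===== SOURCE B (Python) =====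
-- def _calculate_isolation_period(component_steps, step_dependencies, extracted_steps):
--     if not component_steps:
--         return 0
--     first = min(component_steps)
--     component_set = set(component_steps)
--     external = [s for s in component_steps
--                 if step_dependencies.get(s, set()) - component_set]
--     if not external:
--         return max(component_steps) - first + 1
--     m = min(external)
--     preceding = [s for s in component_steps if s < m]
--     last = max(preceding) if preceding else first
--     return last - first + 1
-- ===== Notes on version B (the rewrite author's own statement) =====
-- stated objective: alternative
-- what changed: Replaces A's sort-then-scan-with-index-recovery by sortless min/max/filter passes: B computes the minimum externally-dependent step and the maximum component step below it directly, never sorting the list.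
import Mathlib
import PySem

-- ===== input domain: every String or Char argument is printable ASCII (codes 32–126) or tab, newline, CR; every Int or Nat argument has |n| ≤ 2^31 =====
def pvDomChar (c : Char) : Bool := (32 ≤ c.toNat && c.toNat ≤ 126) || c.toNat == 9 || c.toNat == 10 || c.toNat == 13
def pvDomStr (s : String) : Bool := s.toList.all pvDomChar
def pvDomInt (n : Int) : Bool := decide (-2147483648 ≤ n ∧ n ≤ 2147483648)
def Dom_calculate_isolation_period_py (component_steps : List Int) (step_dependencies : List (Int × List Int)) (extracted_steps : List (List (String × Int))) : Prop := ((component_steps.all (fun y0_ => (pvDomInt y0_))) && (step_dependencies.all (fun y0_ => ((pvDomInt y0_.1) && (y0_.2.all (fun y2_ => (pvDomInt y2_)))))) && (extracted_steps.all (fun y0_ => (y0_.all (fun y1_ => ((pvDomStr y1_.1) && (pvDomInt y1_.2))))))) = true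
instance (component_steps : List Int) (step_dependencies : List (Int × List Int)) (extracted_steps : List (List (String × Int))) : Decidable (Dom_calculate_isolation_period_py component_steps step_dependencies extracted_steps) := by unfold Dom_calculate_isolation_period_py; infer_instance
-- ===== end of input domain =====

-- B replaces A's sort-then-scan (with .index recovery of the predecessor) by sortless
-- min/max/filter passes; proved to return the same value on every input (both are total).

-- ===== PORT A =====
-- shared predicate: Python's 'step_dependencies.get(step, set()) - component_set' is nonempty
-- (the identical expression appears in both Pythons)
def pvHasExt (step_dependencies : List (Int × List Int)) (cset : List Int) (s : Int) : Bool :=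
  !(PySem.Set.diff (PySem.Set.ofList ((PySem.Dict.ofList step_dependencies).getD s [])) cset).isEmpty

-- the 'for step in sorted_steps: … break' loop of A; on the first step with external deps it
-- computes step_idx via .index and returns the predecessor (indices are in range, so the
-- pyGetD/getD defaults are never used)
def pvScanA (step_dependencies : List (Int × List Int)) (cset S : List Int) (first : Int) :
    List Int → Int → Int
  | [], last => last
  | s :: rest, last =>
    if pvHasExt step_dependencies cset s then
      let idx := (PySem.List.index? S s).getD 0
      if 0 < idx then PySem.List.pyGetD S ((idx : Int) - 1) 0 else first
    else pvScanA step_dependencies cset S first rest last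

def calculate_isolation_period_py (component_steps : List Int) (step_dependencies : List (Int × List Int)) (extracted_steps : List (List (String × Int))) : Int :=
  let cset := PySem.Set.ofList component_steps
  let S := PySem.List.sorted component_steps (fun x => x) false
  if S = [] then 0
  else
    let first := PySem.List.pyGetD S 0 0
    let last := PySem.List.pyGetD S (-1) 0
    (pvScanA step_dependencies cset S first S last) - first + 1

-- ===== PORT B =====
def calculate_isolation_period_py_alt (component_steps : List Int) (step_dependencies : List (Int × List Int)) (extracted_steps : List (List (String × Int))) : Int :=
  if component_steps = [] then 0
  else
    let first := (PySem.List.min? component_steps (fun x => x)).getD 0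
    let cset := PySem.Set.ofList component_steps
    let ext := component_steps.filter (fun s => pvHasExt step_dependencies cset s)
    if ext = [] then (PySem.List.max? component_steps (fun x => x)).getD 0 - first + 1
    else
      let m := (PySem.List.min? ext (fun x => x)).getD 0
      let preceding := component_steps.filter (fun s => decide (s < m))
      let last := if preceding = [] then first
                  else (PySem.List.max? preceding (fun x => x)).getD 0
      last - first + 1

-- ===== PRECONDITION & SPEC =====
def Spec_calculate_isolation_period_py (component_steps : List Int) (step_dependencies : List (Int × List Int)) (extracted_steps : List (List (String × Int))) (out : Int) : Prop := out = calculate_isolation_period_py_alt component_steps step_dependencies extracted_steps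
instance (component_steps : List Int) (step_dependencies : List (Int × List Int)) (extracted_steps : List (List (String × Int))) (out : Int) : Decidable (Spec_calculate_isolation_period_py component_steps step_dependencies extracted_steps out) := by unfold Spec_calculate_isolation_period_py; infer_instance

-- ===== CLAIM (what is proved, stated in full; the proofs are below) =====
def Claim_equal_calculate_isolation_period_py : Prop := ∀ (component_steps : List Int) (step_dependencies : List (Int × List Int)) (extracted_steps : List (List (String × Int))), Dom_calculate_isolation_period_py component_steps step_dependencies extracted_steps → Spec_calculate_isolation_period_py component_steps step_dependencies extracted_steps (calculate_isolation_period_py component_steps step_dependencies extracted_steps)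

-- ===== LEMMAS AND PROOFS =====

-- the A-loop returns 'last' if no step has external deps, else the index computation at the first one
theorem pvScanA_eq_find (sd : List (Int × List Int)) (cset S : List Int) (first : Int) :
    ∀ (l : List Int) (last : Int), pvScanA sd cset S first l last =
      match l.find? (pvHasExt sd cset) with
      | none => last
      | some s =>
        if 0 < (PySem.List.index? S s).getD 0 then
          PySem.List.pyGetD S ((((PySem.List.index? S s).getD 0 : Nat) : Int) - 1) 0
        else first := by
  intro l
  induction l with
  | nil => intro last; rfl
  | cons s rest ih =>
    intro last
    by_cases hp : pvHasExt sd cset s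
    · simp [pvScanA, List.find?, hp]
    · simp [pvScanA, List.find?, hp, ih]

-- a ≤-pairwise list is bounded by its last element
theorem pw_le_getLast {l : List Int} (h : l.Pairwise (· ≤ ·)) (hne : l ≠ []) :
    ∀ x ∈ l, x ≤ l.getLast hne := by
  induction l with
  | nil => simp
  | cons a t ih =>
    intro x hx
    rcases List.pairwise_cons.mp h with ⟨ha, ht⟩
    cases t with
    | nil => simp at hx; simp [hx]
    | cons b u =>
      rcases List.mem_cons.mp hx with rfl | hx
      · have h1 := ih ht (by simp) b (by simp)
        simpa [List.getLast_cons] using le_trans (ha b (by simp)) h1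
      · simpa [List.getLast_cons] using ih ht (by simp) x hx

-- min(component_steps) is the head of the sorted list
theorem pv_min_eq_head (cs : List Int) (s0 : Int) (t : List Int)
    (hS : PySem.List.sorted cs (fun x => x) false = s0 :: t) :
    (PySem.List.min? cs (fun x => x)).getD 0 = s0 := by
  have hs0 : s0 ∈ cs := by
    have h : s0 ∈ PySem.List.sorted cs (fun x => x) false := by
      rw [hS]; exact List.mem_cons_self
    exact (PySem.List.mem_sorted _ _ _ _).mp h
  obtain ⟨mv, hmv⟩ : ∃ mv, PySem.List.min? cs (fun x => x) = some mv := by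
    cases h : PySem.List.min? cs (fun x => x) with
    | none => exact absurd ((PySem.List.min?_eq_none_iff _ _).mp h) (List.ne_nil_of_mem hs0)
    | some mv => exact ⟨mv, rfl⟩
  rw [hmv]
  exact le_antisymm (PySem.List.min?_isMin hmv s0 hs0)
    (PySem.List.key_head_sorted_le _ _ hS mv (PySem.List.min?_mem hmv))

-- the main equivalence on a nonempty component list
theorem pv_main_aux (cs : List Int) (sd : List (Int × List Int))
    (es : List (List (String × Int))) (hcs : cs ≠ []) :
    calculate_isolation_period_py cs sd es = calculate_isolation_period_py_alt cs sd es := by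
  obtain ⟨s0, t, hS⟩ : ∃ s0 t, PySem.List.sorted cs (fun x => x) false = s0 :: t := by
    cases h : PySem.List.sorted cs (fun x => x) false with
    | nil => exact absurd ((PySem.List.sorted_eq_nil_iff _ _ _).mp h) hcs
    | cons a b => exact ⟨a, b, rfl⟩
  have hperm : (PySem.List.sorted cs (fun x => x) false).Perm cs := PySem.List.sorted_perm _ _ _
  have hpw : (PySem.List.sorted cs (fun x => x) false).Pairwise (· ≤ ·) := by
    simpa using PySem.List.sorted_pairwise cs (fun x => x)
  have hmemS : ∀ x : Int, x ∈ PySem.List.sorted cs (fun x => x) false ↔ x ∈ cs :=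
    fun x => PySem.List.mem_sorted _ _ _ x
  have hmin := pv_min_eq_head cs s0 t hS
  have hSne : PySem.List.sorted cs (fun x => x) false ≠ [] := by rw [hS]; simp
  have hfirst : PySem.List.pyGetD (PySem.List.sorted cs (fun x => x) false) 0 0 = s0 := by
    rw [hS]; exact PySem.List.pyGetD_zero_cons _ _ _
  cases hf : (PySem.List.sorted cs (fun x => x) false).find? (pvHasExt sd (PySem.Set.ofList cs)) with
  | none =>
    -- no step has external dependencies: both sides span min..max
    have hnone : ∀ x ∈ cs, pvHasExt sd (PySem.Set.ofList cs) x = false := by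
      intro x hx
      have h := List.find?_eq_none.mp hf x ((hmemS x).mpr hx)
      simpa using h
    have hext : cs.filter (fun s => pvHasExt sd (PySem.Set.ofList cs) s) = [] :=
      List.filter_eq_nil_iff.mpr (fun a ha => by simp [hnone a ha])
    obtain ⟨M, hM⟩ : ∃ M, PySem.List.max? cs (fun x => x) = some M := by
      cases h : PySem.List.max? cs (fun x => x) with
      | none => exact absurd ((PySem.List.max?_eq_none_iff _ _).mp h) hcs
      | some M => exact ⟨M, rfl⟩
    have hMax : M = (PySem.List.sorted cs (fun x => x) false).getLast hSne := by
      refine le_antisymm ?_ ?_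
      · exact pw_le_getLast hpw hSne M ((hmemS M).mpr (PySem.List.max?_mem hM))
      · exact PySem.List.max?_isMax hM _ ((hmemS _).mp (List.getLast_mem hSne))
    simp only [calculate_isolation_period_py, calculate_isolation_period_py_alt,
      if_neg hSne, if_neg hcs, pvScanA_eq_find, hf]
    rw [if_pos hext, hM, hfirst, hmin, PySem.List.pyGetD_neg_one _ 0 hSne, hMax]
    rfl
  | some m =>
    rcases List.find?_eq_some_iff_append.mp hf with ⟨hPm, pre, suf, hsplit, hpre⟩
    have hpreF : ∀ a ∈ pre, pvHasExt sd (PySem.Set.ofList cs) a = false := by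
      intro a ha; have h := hpre a ha; simpa using h
    have hmpre : m ∉ pre := by
      intro h
      have := hpreF m h
      rw [this] at hPm; exact Bool.false_ne_true hPm
    have hidx : PySem.List.index? (PySem.List.sorted cs (fun x => x) false) m = some pre.length :=
      (PySem.List.index?_eq_some_iff _ _ _).mpr ⟨pre, suf, hsplit, rfl, hmpre⟩
    have hmcs : m ∈ cs := (hmemS m).mp (by rw [hsplit]; exact List.mem_append_right _ List.mem_cons_self)
    -- decompose the sortedness of S = pre ++ m :: suf
    have hpw' := hsplit ▸ hpw
    rcases List.pairwise_append.mp hpw' with ⟨hpwpre, hpwms, hcross⟩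
    have hgesuf : ∀ y ∈ suf, m ≤ y := (List.pairwise_cons.mp hpwms).1
    have hlt : ∀ x ∈ pre, x < m := by
      intro x hx
      refine lt_of_le_of_ne (hcross x hx m List.mem_cons_self) ?_
      intro he
      have := hpreF x hx
      rw [← he, this] at hPm
      exact Bool.false_ne_true hPm
    -- elements below m are exactly pre
    have hfilterS : (PySem.List.sorted cs (fun x => x) false).filter (fun s => decide (s < m)) = pre := by
      rw [hsplit, List.filter_append]
      have h1 : pre.filter (fun s => decide (s < m)) = pre :=
        List.filter_eq_self.mpr (fun x hx => by simpa using hlt x hx)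
      have h2 : (m :: suf).filter (fun s => decide (s < m)) = [] := by
        refine List.filter_eq_nil_iff.mpr ?_
        intro a ha
        rcases List.mem_cons.mp ha with rfl | ha
        · simp
        · simpa using not_lt.mpr (hgesuf a ha)
      rw [h1, h2, List.append_nil]
    have hprec_perm : (cs.filter (fun s => decide (s < m))).Perm pre := by
      rw [← hfilterS]; exact (hperm.filter _).symm
    -- B's minimum external step equals m
    have hmext : m ∈ cs.filter (fun s => pvHasExt sd (PySem.Set.ofList cs) s) :=
      List.mem_filter.mpr ⟨hmcs, hPm⟩
    have hextne : cs.filter (fun s => pvHasExt sd (PySem.Set.ofList cs) s) ≠ [] :=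
      List.ne_nil_of_mem hmext
    obtain ⟨mb, hmb⟩ : ∃ mb, PySem.List.min? (cs.filter (fun s => pvHasExt sd (PySem.Set.ofList cs) s)) (fun x => x) = some mb := by
      cases h : PySem.List.min? (cs.filter (fun s => pvHasExt sd (PySem.Set.ofList cs) s)) (fun x => x) with
      | none => exact absurd ((PySem.List.min?_eq_none_iff _ _).mp h) hextne
      | some mb => exact ⟨mb, rfl⟩
    have hmbm : mb = m := by
      rcases List.mem_filter.mp (PySem.List.min?_mem hmb) with ⟨hmbcs, hmbP⟩
      refine le_antisymm (PySem.List.min?_isMin hmb m hmext) ?_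
      have hmbS : mb ∈ pre ++ m :: suf := by rw [← hsplit]; exact (hmemS mb).mpr hmbcs
      rcases List.mem_append.mp hmbS with h | h
      · exact absurd hmbP (by simp [hpreF mb h])
      · rcases List.mem_cons.mp h with he | h
        · exact he.ge
        · exact hgesuf mb h
    -- assemble both sides
    simp only [calculate_isolation_period_py, calculate_isolation_period_py_alt,
      if_neg hSne, if_neg hcs, pvScanA_eq_find, hf, hidx, Option.getD_some,
      if_neg hextne, hmin, hmb, hmbm, hfirst]
    by_cases hpre0 : pre = []
    · -- the very first sorted step already has external deps: both sides give first
      have hprecnil : cs.filter (fun s => decide (s < m)) = [] := by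
        rw [hpre0] at hprec_perm
        exact hprec_perm.eq_nil
      rw [hpre0, hprecnil]
      simp
    · -- A takes S[idx-1], B the maximum component step below m; both are pre's last element
      have hpos : 0 < pre.length := List.length_pos_iff.mpr hpre0
      have hA : PySem.List.pyGetD (PySem.List.sorted cs (fun x => x) false)
          (((pre.length : Nat) : Int) - 1) 0 = pre.getLast hpre0 := by
        have hlen1 : (((pre.length : Nat) : Int) - 1) = ((pre.length - 1 : Nat) : Int) := by
          omega
        rw [hlen1, PySem.List.pyGetD_natCast, hsplit]
        rw [List.getD_eq_getElem?_getD, List.getElem?_append_left (by omega),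
          List.getElem?_eq_getElem (by omega), List.getLast_eq_getElem]
        rfl
      have hprecne : cs.filter (fun s => decide (s < m)) ≠ [] := by
        intro h
        rw [h] at hprec_perm
        exact hpre0 hprec_perm.symm.eq_nil
      obtain ⟨Mb, hMb⟩ : ∃ Mb, PySem.List.max? (cs.filter (fun s => decide (s < m))) (fun x => x) = some Mb := by
        cases h : PySem.List.max? (cs.filter (fun s => decide (s < m))) (fun x => x) with
        | none => exact absurd ((PySem.List.max?_eq_none_iff _ _).mp h) hprecne
        | some Mb => exact ⟨Mb, rfl⟩
      have hMbv : Mb = pre.getLast hpre0 := by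
        refine le_antisymm ?_ ?_
        · exact pw_le_getLast hpwpre hpre0 Mb (hprec_perm.mem_iff.mp (PySem.List.max?_mem hMb))
        · exact PySem.List.max?_isMax hMb _ (hprec_perm.mem_iff.mpr (List.getLast_mem hpre0))
      rw [if_pos hpos, hA, if_neg hprecne, hMb, Option.getD_some, hMbv]

-- ===== VERDICT (by name: the statement is the Claim_ definition above) =====
theorem calculate_isolation_period_py_spec : Claim_equal_calculate_isolation_period_py := by
  intro cs sd es _
  unfold Spec_calculate_isolation_period_py
  by_cases hcs : cs = []
  · subst hcs; rfl
  · exact pv_main_aux cs sd es hcs
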